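-- pv_equiv track=rewrite | github.com/BrigtHaavardstun/Strong_teaching_book | generatingTeachingSets/teachingSetGenerator.py | generateAndClauseOfSizeK
-- ===== SOURCE A (Python) =====
-- import itertools
--
-- def generateAndClauseOfSizeK(alphabet, size, negation=True):
--     boolean_list = (list(itertools.combinations(alphabet, size)))
--     boolean_all_bools = []
--     for boolean in boolean_list:
--         boolean_w_negation = []
--         for i in range(pow(2, size)-1,-1,-1): # To have order "deceding", first True,True,True,True, and then True,TrueTrue,False. Finaly False, False,...
--             current_config = [bit=="1" for bit in bin(i)[2:].rjust(size, "0")]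
--             new_boolean = ""
--             for b,c in zip(boolean, current_config):
--                 new_boolean += b
--                 if not c:
--                     new_boolean += "'"
--
--             boolean_w_negation.append(new_boolean)
--
--         boolean_all_bools.extend(boolean_w_negation)
--
--     return boolean_all_bools
-- ===== SOURCE B (Python) =====
-- import itertools
--
-- def generateAndClauseOfSizeK(alphabet, size, negation=True):
--     result = []
--     for combo in itertools.combinations(alphabet, size):
--         options = [(c, c + "'") for c in combo]
--         for config in itertools.product(*options):
--             result.append("".join(config))
--     return result
-- ===== Notes on version B (the rewrite author's own statement) =====
-- stated objective: simpler
-- what changed: Replaces the descending integer counter with bin()/rjust bit-string decoding by a direct itertools.product over the two spellings (c, c+"'") of each literal, joining each tuple; putting the plain spelling first reproduces A's all-true-first order.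
import Mathlib
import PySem

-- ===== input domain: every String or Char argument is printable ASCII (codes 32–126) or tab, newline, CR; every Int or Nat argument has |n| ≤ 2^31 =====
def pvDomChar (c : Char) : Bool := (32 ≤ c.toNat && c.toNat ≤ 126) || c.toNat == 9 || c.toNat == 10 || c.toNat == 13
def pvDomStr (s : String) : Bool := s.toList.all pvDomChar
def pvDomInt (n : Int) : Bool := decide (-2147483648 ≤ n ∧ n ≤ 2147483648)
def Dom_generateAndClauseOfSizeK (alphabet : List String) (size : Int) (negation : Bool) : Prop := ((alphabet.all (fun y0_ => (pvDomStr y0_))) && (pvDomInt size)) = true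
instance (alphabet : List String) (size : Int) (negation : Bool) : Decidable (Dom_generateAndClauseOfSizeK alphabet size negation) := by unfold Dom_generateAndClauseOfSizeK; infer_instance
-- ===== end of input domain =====

-- B replaces A's descending integer counter + bin()/rjust bit decoding by a direct cartesian
-- product over the two spellings (plain, primed) of each literal; same order, same cost (objective: simpler).


-- ===== PORT A =====
-- itertools.combinations(xs, k) in Python's order (shared library helper, used by both ports)
def pyCombinations {α : Type} : List α → Nat → List (List α)
  | _, 0 => [[]]
  | [], _ + 1 => []
  | x :: rest, k + 1 => (pyCombinations rest k).map (x :: ·) ++ pyCombinations rest (k + 1)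

-- [bit == "1" for bit in bin(i)[2:].rjust(size, "0")]; exact for i ≥ 0 (with size ≥ 0 the loop
-- only produces i ≥ 0); rjust pads on the left with '0' up to width size, never truncates.
def binConfig (i : Int) (size : Int) : List Bool :=
  let s := PySem.List.slice (PySem.Int.toBinChars0b i) (some 2) none
  (List.replicate (size.toNat - s.length) '0' ++ s).map (fun bit => bit == '1')

-- the 'new_boolean' accumulation over 'for b, c in zip(boolean, current_config)'
def clauseOf (boolean : List String) (current_config : List Bool) : String :=
  (List.zip boolean current_config).foldl (fun new_boolean bc =>
    let new_boolean := new_boolean ++ bc.1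
    if !bc.2 then new_boolean ++ "'" else new_boolean) ""

def generateAndClauseOfSizeK (alphabet : List String) (size : Int) (negation : Bool) : List String :=
  if size < 0 then [] else  -- itertools.combinations raises ValueError for negative size (outside Pre_)
  let boolean_list := pyCombinations alphabet size.toNat
  boolean_list.foldl (fun boolean_all_bools boolean =>
    let boolean_w_negation := (PySem.List.pyRange ((2 : Int) ^ size.toNat - 1) (-1) (-1)).foldl
      (fun acc i => acc ++ [clauseOf boolean (binConfig i size)]) []
    boolean_all_bools ++ boolean_w_negation) []

-- ===== PORT B =====
-- itertools.product(*options) over pairs, first component first (Python's product order)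
def prodChoices : List (String × String) → List (List String)
  | [] => [[]]
  | p :: ps => [p.1, p.2].flatMap (fun v => (prodChoices ps).map (v :: ·))

def generateAndClauseOfSizeK_alt (alphabet : List String) (size : Int) (negation : Bool) : List String :=
  if size < 0 then [] else  -- same ValueError of itertools.combinations (outside Pre_)
  (pyCombinations alphabet size.toNat).flatMap (fun combo =>
    let options := combo.map (fun c => (c, c ++ "'"))
    (prodChoices options).map (fun config => String.join config))

-- ===== PRECONDITION & SPEC =====
-- Pre_ excludes only negative size, on which Python's itertools.combinations raises ValueError.
def Pre_generateAndClauseOfSizeK (alphabet : List String) (size : Int) (negation : Bool) : Prop := 0 ≤ size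
instance (alphabet : List String) (size : Int) (negation : Bool) : Decidable (Pre_generateAndClauseOfSizeK alphabet size negation) := by unfold Pre_generateAndClauseOfSizeK; infer_instance
def pvWitness_generateAndClauseOfSizeK : List String × Int × Bool := (["a", "b"], 2, true)

def Spec_generateAndClauseOfSizeK (alphabet : List String) (size : Int) (negation : Bool) (out : List String) : Prop := out = generateAndClauseOfSizeK_alt alphabet size negation
instance (alphabet : List String) (size : Int) (negation : Bool) (out : List String) : Decidable (Spec_generateAndClauseOfSizeK alphabet size negation out) := by unfold Spec_generateAndClauseOfSizeK; infer_instance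

-- ===== CLAIM (what is proved, stated in full; the proofs are below) =====
def Claim_equal_generateAndClauseOfSizeK : Prop := ∀ (alphabet : List String) (size : Int) (negation : Bool), Dom_generateAndClauseOfSizeK alphabet size negation → Pre_generateAndClauseOfSizeK alphabet size negation → Spec_generateAndClauseOfSizeK alphabet size negation (generateAndClauseOfSizeK alphabet size negation)

-- ===== LEMMAS AND PROOFS =====

def binChars' (n : Nat) : List Char :=
  if n = 0 then [] else binChars' (n / 2) ++ [Nat.digitChar (n % 2)]
decreasing_by exact Nat.div_lt_self (Nat.pos_of_ne_zero (by assumption)) one_lt_two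

def exactBits : Nat → Nat → List Bool
  | 0, _ => []
  | n + 1, j => exactBits n (j / 2) ++ [decide (j % 2 = 1)]

theorem toDigitsCore_eq (f : Nat) : ∀ (n : Nat) (l : List Char), 1 ≤ n → n < f →
    Nat.toDigitsCore 2 f n l = binChars' n ++ l := by
  induction f with
  | zero => intro n l h1 h2; omega
  | succ f ih =>
    intro n l h1 h2
    simp only [Nat.toDigitsCore]
    by_cases h : n / 2 = 0
    · have hn : n = 1 := by omega
      subst hn
      simp [binChars']
    · rw [if_neg h, ih (n / 2) _ (by omega) (by omega)]
      conv_rhs => rw [binChars']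
      rw [if_neg (by omega : ¬ n = 0)]
      simp

theorem toDigits_two_eq (j : Nat) : Nat.toDigits 2 j = if j = 0 then ['0'] else binChars' j := by
  by_cases h : j = 0
  · subst h; decide
  · rw [if_neg h]
    exact toDigitsCore_eq (j+1) j [] (by omega) (by omega) |>.trans (by simp)

theorem exactBits_zero (n : Nat) : exactBits n 0 = List.replicate n false := by
  induction n with
  | zero => rfl
  | succ n ih => simp [exactBits, ih, List.replicate_succ']

theorem exactBits_low {n j : Nat} (h : j < 2 ^ n) : exactBits (n + 1) j = false :: exactBits n j := by
  induction n generalizing j with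
  | zero => interval_cases j; rfl
  | succ n ih =>
    have h2 : 2 ^ (n + 1) = 2 * 2 ^ n := by ring
    have hj2 : j / 2 < 2 ^ n := by omega
    rw [show exactBits (n+2) j = exactBits (n+1) (j/2) ++ [decide (j % 2 = 1)] from rfl,
        ih hj2, show exactBits (n+1) j = exactBits n (j/2) ++ [decide (j % 2 = 1)] from rfl]
    rfl

theorem exactBits_high {n j : Nat} (h : j < 2 ^ n) :
    exactBits (n + 1) (2 ^ n + j) = true :: exactBits n j := by
  induction n generalizing j with
  | zero => interval_cases j; rfl
  | succ n ih =>
    have h2 : 2 ^ (n + 1) = 2 * 2 ^ n := by ring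
    have hj2 : j / 2 < 2 ^ n := by omega
    have hd : (2 ^ (n+1) + j) / 2 = 2 ^ n + j / 2 := by omega
    have hm : (2 ^ (n+1) + j) % 2 = j % 2 := by omega
    rw [show exactBits (n+2) (2^(n+1)+j) = exactBits (n+1) ((2^(n+1)+j)/2) ++ [decide ((2^(n+1)+j) % 2 = 1)] from rfl,
        hd, hm, ih hj2, show exactBits (n+1) j = exactBits n (j/2) ++ [decide (j % 2 = 1)] from rfl]
    rfl

def padCfg (n j : Nat) : List Bool :=
  (List.replicate (n - (Nat.toDigits 2 j).length) '0' ++ Nat.toDigits 2 j).map (fun bit => bit == '1')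

theorem binChars'_map_aux (j : Nat) : ∀ n, 1 ≤ j → j < 2 ^ n →
    List.replicate (n - (binChars' j).length) false ++ (binChars' j).map (fun bit => bit == '1') =
      exactBits n j := by
  induction j using Nat.strong_induction_on with
  | _ j ih =>
    intro n h1 h2
    by_cases hj : j = 1
    · subst hj
      have hn : 1 ≤ n := by by_contra hc; simp [Nat.lt_one_iff.mp (by omega : n < 1)] at h2
      obtain ⟨m, rfl⟩ := Nat.exists_eq_add_of_le hn
      rw [show binChars' 1 = ['1'] from by rw [binChars', binChars']; rfl]
      rw [show exactBits (1 + m) 1 = exactBits m (1/2) ++ [decide (1 % 2 = 1)] from by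
        rw [Nat.add_comm]; rfl]
      simp [exactBits_zero]
    · -- j ≥ 2
      have hj2 : 2 ≤ j := by omega
      have hn2 : 2 ≤ n := by
        by_contra hc
        interval_cases n <;> omega
      obtain ⟨m, rfl⟩ := Nat.exists_eq_add_of_le (by omega : 1 ≤ n)
      have h2' : 2 ^ (1 + m) = 2 * 2 ^ m := by ring
      have hjm : j / 2 < 2 ^ m := by omega
      conv_lhs => rw [binChars']
      rw [if_neg (by omega : ¬ j = 0)]
      have hrec := ih (j / 2) (by omega) m (by omega) hjm
      rw [show exactBits (1 + m) j = exactBits m (j/2) ++ [decide (j % 2 = 1)] from by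
        rw [Nat.add_comm]; rfl]
      rw [List.length_append, List.map_append, ← List.append_assoc]
      rw [show (1 + m) - ((binChars' (j/2)).length + [Nat.digitChar (j % 2)].length)
            = m - (binChars' (j/2)).length from by simp; omega]
      rw [hrec]
      congr 1
      rcases Nat.mod_two_eq_zero_or_one j with h | h <;> rw [h] <;> rfl

theorem padCfg_eq_exactBits {n j : Nat} (hn : 1 ≤ n) (hj : j < 2 ^ n) :
    padCfg n j = exactBits n j := by
  unfold padCfg
  rw [toDigits_two_eq]
  by_cases h : j = 0
  · subst h
    rw [if_pos rfl]
    obtain ⟨m, rfl⟩ := Nat.exists_eq_add_of_le hn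
    simp [exactBits_zero, List.map_replicate]
    rw [← List.replicate_succ']
    simp [Nat.add_comm]
  · rw [if_neg h, List.map_append, List.map_replicate]
    simpa using binChars'_map_aux j n (by omega) hj





theorem binConfig_natCast (j : Nat) (size : Int) :
    binConfig (j : Int) size = padCfg size.toNat j := by
  unfold binConfig padCfg
  rw [show PySem.Int.toBinChars0b (j : Int) = '0' :: 'b' :: Nat.toDigits 2 j from by
    unfold PySem.Int.toBinChars0b
    rw [if_neg (by omega)]
    simp]
  rw [PySem.List.slice_from _ (by omega : (0:Int) ≤ 2)]
  simp

theorem foldl_clause_from (L : List (String × Bool)) : ∀ s : String,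
    L.foldl (fun new_boolean bc =>
      let new_boolean := new_boolean ++ bc.1
      if !bc.2 then new_boolean ++ "'" else new_boolean) s =
    s ++ L.foldl (fun new_boolean bc =>
      let new_boolean := new_boolean ++ bc.1
      if !bc.2 then new_boolean ++ "'" else new_boolean) "" := by
  induction L with
  | nil => intro s; simp [String.append_empty]
  | cons p L ih =>
    intro s
    simp only [List.foldl_cons]
    rw [ih, ih (let nb := "" ++ p.1; if !p.2 then nb ++ "'" else nb)]
    cases hp : p.2 <;> simp [String.empty_append, String.append_assoc]

theorem clauseOf_cons (b : String) (bs : List String) (c : Bool) (cfg : List Bool) :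
    clauseOf (b :: bs) (c :: cfg) = (if c then b else b ++ "'") ++ clauseOf bs cfg := by
  unfold clauseOf
  simp only [List.zip_cons_cons, List.foldl_cons]
  rw [foldl_clause_from]
  cases c <;> simp [String.empty_append]

theorem clauseOf_exact_pad (cs : List String) {j : Nat} (hj : j < 2 ^ cs.length) :
    clauseOf cs (exactBits cs.length j) = clauseOf cs (padCfg cs.length j) := by
  cases cs with
  | nil => rfl
  | cons b bs => rw [padCfg_eq_exactBits (by simp) hj]

theorem join_from (L : List String) : ∀ s : String,
    L.foldl (· ++ ·) s = s ++ L.foldl (· ++ ·) "" := by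
  induction L with
  | nil => intro s; simp [String.append_empty]
  | cons p L ih =>
    intro s
    simp only [List.foldl_cons]
    rw [ih, ih ("" ++ p)]
    simp [String.empty_append, String.append_assoc]

theorem join_cons (a : String) (l : List String) : String.join (a :: l) = a ++ String.join l := by
  show (a :: l).foldl (· ++ ·) "" = a ++ l.foldl (· ++ ·) ""
  simp only [List.foldl_cons]
  rw [join_from]
  simp [String.empty_append]

theorem range_reverse_map {α : Type} (m : Nat) (g : Nat → α) :
    (List.range m).map (fun k => g (m - 1 - k)) = (List.range m).reverse.map g := by
  apply List.ext_getElem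
  · simp
  · intro i h1 h2
    simp [List.getElem_reverse]

theorem mem_pyCombinations_length {α : Type} (xs : List α) :
    ∀ (k : Nat), ∀ bs ∈ pyCombinations xs k, bs.length = k := by
  induction xs with
  | nil =>
    intro k bs h
    cases k with
    | zero => simp [pyCombinations] at h; simp [h]
    | succ k => simp [pyCombinations] at h
  | cons x rest ih =>
    intro k bs h
    cases k with
    | zero => simp [pyCombinations] at h; simp [h]
    | succ k =>
      simp only [pyCombinations, List.mem_append, List.mem_map] at h
      rcases h with ⟨t, ht, rfl⟩ | h
      · simp [ih k t ht]
      · exact ih (k+1) bs h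

theorem main_combo (bs : List String) :
    (List.range (2 ^ bs.length)).reverse.map (fun j => clauseOf bs (padCfg bs.length j)) =
      (prodChoices (bs.map (fun c => (c, c ++ "'")))).map (fun config => String.join config) := by
  induction bs with
  | nil =>
    simp [prodChoices]
    rfl
  | cons b cs ih =>
    have hlen : (b :: cs).length = cs.length + 1 := rfl
    have h2 : 2 ^ (cs.length + 1) = 2 ^ cs.length + 2 ^ cs.length := by ring
    rw [hlen, h2, List.range_add, List.reverse_append, List.map_append, ← List.map_reverse,
        List.map_map]
    have hfst : ((List.range (2 ^ cs.length)).reverse.map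
          ((fun j => clauseOf (b :: cs) (padCfg (cs.length + 1) j)) ∘ (fun x => 2 ^ cs.length + x))) =
        (List.range (2 ^ cs.length)).reverse.map (fun j => b ++ clauseOf cs (padCfg cs.length j)) := by
      apply List.map_congr_left
      intro j hj
      have hjlt : j < 2 ^ cs.length := by simpa using hj
      simp only [Function.comp]
      rw [padCfg_eq_exactBits (by omega) (by omega), exactBits_high hjlt, clauseOf_cons]
      rw [show clauseOf cs (exactBits cs.length j) = clauseOf cs (padCfg cs.length j) from
        clauseOf_exact_pad cs hjlt]
      simp
    have hsnd : ((List.range (2 ^ cs.length)).reverse.map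
          (fun j => clauseOf (b :: cs) (padCfg (cs.length + 1) j))) =
        (List.range (2 ^ cs.length)).reverse.map (fun j => (b ++ "'") ++ clauseOf cs (padCfg cs.length j)) := by
      apply List.map_congr_left
      intro j hj
      have hjlt : j < 2 ^ cs.length := by simpa using hj
      rw [padCfg_eq_exactBits (by omega) (by omega : j < 2 ^ (cs.length + 1)), exactBits_low hjlt,
          clauseOf_cons]
      rw [show clauseOf cs (exactBits cs.length j) = clauseOf cs (padCfg cs.length j) from
        clauseOf_exact_pad cs hjlt]
      simp
    rw [hfst, hsnd]
    rw [show ((List.range (2 ^ cs.length)).reverse.map (fun j => b ++ clauseOf cs (padCfg cs.length j)))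
        = ((List.range (2 ^ cs.length)).reverse.map (fun j => clauseOf cs (padCfg cs.length j))).map (fun t => b ++ t) from by
      rw [List.map_map]; rfl]
    rw [show ((List.range (2 ^ cs.length)).reverse.map (fun j => (b ++ "'") ++ clauseOf cs (padCfg cs.length j)))
        = ((List.range (2 ^ cs.length)).reverse.map (fun j => clauseOf cs (padCfg cs.length j))).map (fun t => (b ++ "'") ++ t) from by
      rw [List.map_map]; rfl]
    rw [ih]
    simp only [List.map_cons, prodChoices, List.flatMap_cons, List.flatMap_nil, List.append_nil,
      List.map_append, List.map_map]
    congr 1 <;> apply List.map_congr_left <;> intro cfg _ <;> simp [Function.comp, join_cons]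

-- ===== VERDICT (by name: the statement is the Claim_ definition above) =====
theorem generateAndClauseOfSizeK_spec : Claim_equal_generateAndClauseOfSizeK := by
  intro alphabet size negation _ hpre
  unfold Spec_generateAndClauseOfSizeK
  have hs : ¬ size < 0 := by exact not_lt.mpr hpre
  have hA : generateAndClauseOfSizeK alphabet size negation =
      (pyCombinations alphabet size.toNat).flatMap (fun boolean =>
        (PySem.List.pyRange ((2 : Int) ^ size.toNat - 1) (-1) (-1)).map
          (fun i => clauseOf boolean (binConfig i size))) := by
    simp only [generateAndClauseOfSizeK, if_neg hs, PySem.List.foldl_append_singleton_eq_map,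
      List.nil_append, PySem.List.foldl_append_eq_flatMap]
  rw [hA]
  simp only [generateAndClauseOfSizeK_alt, if_neg hs]
  rw [List.flatMap_def, List.flatMap_def]
  congr 1
  apply List.map_congr_left
  intro bs hbs
  have hlen : bs.length = size.toNat := mem_pyCombinations_length alphabet size.toNat bs hbs
  have hpow : ((2 : Int) ^ size.toNat) = ((2 ^ size.toNat : Nat) : Int) := by
    rw [Nat.cast_pow]; norm_num
  have hpos : (0 : Int) < 2 ^ size.toNat := pow_pos (by norm_num) _
  have hcast : ((2 : Int) ^ size.toNat - 1 - -1).toNat = 2 ^ size.toNat := by omega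
  rw [PySem.List.pyRange_neg_one, hcast, List.map_map]
  have hinner : (List.range (2 ^ size.toNat)).map
        ((fun i => clauseOf bs (binConfig i size)) ∘ fun k => (2 : Int) ^ size.toNat - 1 - (k : Nat)) =
      (List.range (2 ^ size.toNat)).map (fun k => clauseOf bs (padCfg size.toNat (2 ^ size.toNat - 1 - k))) := by
    apply List.map_congr_left
    intro k hk
    have hklt : k < 2 ^ size.toNat := by simpa using hk
    have hcast2 : (2 : Int) ^ size.toNat - 1 - (k : Nat) = ((2 ^ size.toNat - 1 - k : Nat) : Int) := by
      omega
    simp only [Function.comp]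
    rw [hcast2, binConfig_natCast]
  rw [hinner, range_reverse_map (2 ^ size.toNat) (fun j => clauseOf bs (padCfg size.toNat j))]
  rw [← hlen]
  exact main_combo bs
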